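-- pv_equiv track=rewrite | github.com/lchen1019/OSN-research | T5.py | check_peak
-- ===== SOURCE A (Python) =====
-- def check_peak(prefer):
--     tag = False
--     n = len(prefer)
--     for i in range(n - 1):
--         if not tag:
--             if prefer[i] < prefer[i + 1]:
--                 tag = True
--         else:
--             if prefer[i] > prefer[i + 1]:
--                 return False
--     return True
-- ===== SOURCE B (Python) =====
-- def check_peak(prefer):
--     diffs = [b - a for a, b in zip(prefer, prefer[1:])]
--     asc = [k for k, d in enumerate(diffs) if d > 0]
--     desc = [k for k, d in enumerate(diffs) if d < 0]
--     return (not asc) or (not desc) or max(desc) < min(asc)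
-- ===== Notes on version B (the rewrite author's own statement) =====
-- stated objective: alternative
-- what changed: Instead of a stateful scan, B builds the list of adjacent differences, collects the index sets of strict ascents and strict descents, and answers by index arithmetic: true iff either set is empty or the last descent index precedes the first ascent index.
import Mathlib
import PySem

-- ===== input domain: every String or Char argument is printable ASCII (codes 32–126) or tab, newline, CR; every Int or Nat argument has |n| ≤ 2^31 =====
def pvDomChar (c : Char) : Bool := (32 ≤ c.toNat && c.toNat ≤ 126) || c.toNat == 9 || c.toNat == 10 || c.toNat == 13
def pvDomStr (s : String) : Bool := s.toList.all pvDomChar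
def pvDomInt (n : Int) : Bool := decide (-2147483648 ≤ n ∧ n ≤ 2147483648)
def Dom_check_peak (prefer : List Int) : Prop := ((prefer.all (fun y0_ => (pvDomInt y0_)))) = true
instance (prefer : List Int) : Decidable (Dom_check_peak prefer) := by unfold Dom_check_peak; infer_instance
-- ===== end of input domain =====

-- B replaces A's stateful-flag scan by index arithmetic on the adjacent-difference list: true iff the ascent-index set or the descent-index set is empty, or max(descent indices) < min(ascent indices) (alternative algorithm, same cost).


-- ===== PORT A =====
-- A's loop over i in range(n-1) with the flag `tag`, transcribed as recursion over
-- the successive adjacent pairs with the same `tag` state and the same branch order.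
def check_peak_go (tag : Bool) : List Int → Bool
  | a :: b :: rest =>
      if !tag then
        check_peak_go (if a < b then true else tag) (b :: rest)
      else
        if a > b then false else check_peak_go tag (b :: rest)
  | _ => true

def check_peak (prefer : List Int) : Bool := check_peak_go false prefer

-- ===== PORT B =====
-- Source B: diffs = adjacent differences (zip of the list with its [1:] slice, i.e. drop 1);
-- asc / desc = indices of strictly positive / strictly negative diffs (enumerate + filter);
-- answer: asc empty, or desc empty, or max(desc) < min(asc).
def check_peak_alt (prefer : List Int) : Bool :=
  let diffs := (prefer.zip (prefer.drop 1)).map (fun p => p.2 - p.1)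
  let asc := ((PySem.List.enumerate diffs).filter (fun p => decide (0 < p.2))).map (·.1)
  let desc := ((PySem.List.enumerate diffs).filter (fun p => decide (p.2 < 0))).map (·.1)
  if asc.isEmpty then true
  else if desc.isEmpty then true
  else
    match PySem.List.max? desc (fun k => k), PySem.List.min? asc (fun k => k) with
    | some d, some a => decide (d < a)
    | _, _ => true

-- ===== PRECONDITION & SPEC =====
def Spec_check_peak (prefer : List Int) (out : Bool) : Prop := out = check_peak_alt prefer
instance (prefer : List Int) (out : Bool) : Decidable (Spec_check_peak prefer out) := by unfold Spec_check_peak; infer_instance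

-- ===== CLAIM (what is proved, stated in full; the proofs are below) =====
def Claim_equal_check_peak : Prop := ∀ (prefer : List Int), Dom_check_peak prefer → Spec_check_peak prefer (check_peak prefer)

-- ===== LEMMAS AND PROOFS =====
-- proof-only helpers: B's three lets, with the enumeration start generalized
def diffsOf (l : List Int) : List Int := (l.zip (l.drop 1)).map (fun p => p.2 - p.1)
def ascOf (s : Int) (d : List Int) : List Int :=
  ((PySem.List.enumerate d s).filter (fun p => decide (0 < p.2))).map (·.1)
def descOf (s : Int) (d : List Int) : List Int :=
  ((PySem.List.enumerate d s).filter (fun p => decide (p.2 < 0))).map (·.1)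
def altD (s : Int) (d : List Int) : Bool :=
  if (ascOf s d).isEmpty then true
  else if (descOf s d).isEmpty then true
  else
    match PySem.List.max? (descOf s d) (fun k => k), PySem.List.min? (ascOf s d) (fun k => k) with
    | some d', some a => decide (d' < a)
    | _, _ => true

-- A's loop seen on the difference list
def goD (tag : Bool) : List Int → Bool
  | [] => true
  | x :: r =>
      if !tag then goD (if 0 < x then true else tag) r
      else if x < 0 then false else goD tag r

theorem check_peak_alt_eq (l : List Int) : check_peak_alt l = altD 0 (diffsOf l) := rfl

theorem check_peak_eq_goD (tag : Bool) (l : List Int) :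
    check_peak_go tag l = goD tag (diffsOf l) := by
  induction l generalizing tag with
  | nil => cases tag <;> rfl
  | cons a t ih =>
      cases t with
      | nil => cases tag <;> rfl
      | cons b rest =>
          have hd : diffsOf (a :: b :: rest) = (b - a) :: diffsOf (b :: rest) := rfl
          rw [hd]
          cases tag with
          | false =>
              simp only [check_peak_go, goD, Bool.not_false, if_pos]
              by_cases h : a < b
              · have h' : 0 < b - a := by omega
                simp [h, ih]
              · have h' : ¬ 0 < b - a := by omega
                simp [h, ih]
          | true =>
              simp only [check_peak_go, goD]
              by_cases h : a > b
              · have h' : b - a < 0 := by omega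
                simp [h, h']
              · have h' : ¬ b - a < 0 := by omega
                simp [h, h', ih]

theorem ascOf_cons_pos {x : Int} (h : 0 < x) (s : Int) (r : List Int) :
    ascOf s (x :: r) = s :: ascOf (s + 1) r := by
  simp [ascOf, PySem.List.enumerate_cons, h]

theorem ascOf_cons_nonpos {x : Int} (h : ¬ 0 < x) (s : Int) (r : List Int) :
    ascOf s (x :: r) = ascOf (s + 1) r := by
  simp [ascOf, PySem.List.enumerate_cons, h]

theorem descOf_cons_neg {x : Int} (h : x < 0) (s : Int) (r : List Int) :
    descOf s (x :: r) = s :: descOf (s + 1) r := by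
  simp [descOf, PySem.List.enumerate_cons, h]

theorem descOf_cons_nonneg {x : Int} (h : ¬ x < 0) (s : Int) (r : List Int) :
    descOf s (x :: r) = descOf (s + 1) r := by
  simp [descOf, PySem.List.enumerate_cons, h]

theorem mem_ascOf_le {s y : Int} {d : List Int} (h : y ∈ ascOf s d) : s ≤ y := by
  simp only [ascOf, List.mem_map, List.mem_filter] at h
  obtain ⟨p, ⟨hp, _⟩, rfl⟩ := h
  rw [PySem.List.mem_enumerate_iff] at hp
  obtain ⟨k, _, rfl⟩ := hp
  simp

theorem mem_descOf_le {s y : Int} {d : List Int} (h : y ∈ descOf s d) : s ≤ y := by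
  simp only [descOf, List.mem_map, List.mem_filter] at h
  obtain ⟨p, ⟨hp, _⟩, rfl⟩ := h
  rw [PySem.List.mem_enumerate_iff] at hp
  obtain ⟨k, _, rfl⟩ := hp
  simp

theorem goD_true_eq (r : List Int) (s : Int) : goD true r = (descOf s r).isEmpty := by
  induction r generalizing s with
  | nil => rfl
  | cons x t ih =>
      by_cases h : x < 0
      · simp [goD, h, descOf_cons_neg h]
      · simp [goD, h, descOf_cons_nonneg h, ih (s + 1)]

theorem goD_false_eq (d : List Int) (s : Int) : goD false d = altD s d := by
  induction d generalizing s with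
  | nil => rfl
  | cons x r ih =>
      by_cases hx : 0 < x
      · -- first ascent: A switches to tag = true; B's asc starts with s
        have hxn : ¬ x < 0 := by omega
        have hg : goD false (x :: r) = goD true r := by simp [goD, hx]
        rw [hg, goD_true_eq r (s + 1)]
        rw [altD, ascOf_cons_pos hx, descOf_cons_nonneg hxn]
        cases hD : (descOf (s + 1) r).isEmpty with
        | true => simp
        | false =>
            simp only [List.isEmpty_cons, if_neg, Bool.false_eq_true, not_false_eq_true]
            have hne : descOf (s + 1) r ≠ [] := by
              intro h; rw [h] at hD; simp at hD
            cases hM : PySem.List.max? (descOf (s + 1) r) (fun k => k) with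
            | none => exact absurd ((PySem.List.max?_eq_none_iff _ _).mp hM) hne
            | some dm =>
                cases hm : PySem.List.min? (s :: ascOf (s + 1) r) (fun k => k) with
                | none =>
                    have := (PySem.List.min?_eq_none_iff (s :: ascOf (s + 1) r) (fun k => k)).mp hm
                    simp at this
                | some a =>
                    have ha : a ≤ s := PySem.List.min?_isMin hm s (by simp)
                    have hdm : s + 1 ≤ dm := mem_descOf_le (PySem.List.max?_mem hM)
                    simp; omega
      · -- no ascent yet: A keeps tag = false; B's index sets shift by one
        have hg : goD false (x :: r) = goD false r := by simp [goD, hx]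
        rw [hg, ih (s + 1), altD, altD, ascOf_cons_nonpos hx]
        by_cases hx2 : x < 0
        · rw [descOf_cons_neg hx2]
          cases hA : (ascOf (s + 1) r).isEmpty with
          | true => simp
          | false =>
              simp only [Bool.false_eq_true, if_false, List.isEmpty_cons]
              have hAne : ascOf (s + 1) r ≠ [] := by
                intro h; rw [h] at hA; simp at hA
              cases hm : PySem.List.min? (ascOf (s + 1) r) (fun k => k) with
              | none => exact absurd ((PySem.List.min?_eq_none_iff _ _).mp hm) hAne
              | some a =>
                  have ha : s + 1 ≤ a := mem_ascOf_le (PySem.List.min?_mem hm)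
                  cases hD : (descOf (s + 1) r).isEmpty with
                  | true =>
                      -- desc of tail empty: on the left the only descent index is s, and s < a
                      have hDe : descOf (s + 1) r = [] := by
                        cases hDl : descOf (s + 1) r with
                        | nil => rfl
                        | cons z zs => rw [hDl] at hD; simp at hD
                      rw [hDe]
                      simp only []
                      have : PySem.List.max? [s] (fun k : Int => k) = some s := by
                        simp [PySem.List.max?]
                      simp [this]
                      omega
                  | false =>
                      have hDne : descOf (s + 1) r ≠ [] := by
                        intro h; rw [h] at hD; simp at hD
                      cases hM : PySem.List.max? (descOf (s + 1) r) (fun k => k) with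
                      | none => exact absurd ((PySem.List.max?_eq_none_iff _ _).mp hM) hDne
                      | some dm =>
                          -- max of (s :: desc) equals max of desc, since every desc index ≥ s+1 > s
                          have hdm_mem : dm ∈ descOf (s + 1) r := PySem.List.max?_mem hM
                          have hdm : s + 1 ≤ dm := mem_descOf_le hdm_mem
                          cases hM2 : PySem.List.max? (s :: descOf (s + 1) r) (fun k => k) with
                          | none =>
                              have := (PySem.List.max?_eq_none_iff (s :: descOf (s + 1) r) (fun k => k)).mp hM2
                              simp at this
                          | some dm2 =>
                              have h1 : dm ≤ dm2 := PySem.List.max?_isMax hM2 dm (by simp [hdm_mem])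
                              have hmem2 : dm2 ∈ s :: descOf (s + 1) r := PySem.List.max?_mem hM2
                              have h2 : dm2 ≤ dm := by
                                rcases List.mem_cons.mp hmem2 with h | h
                                · omega
                                · exact PySem.List.max?_isMax hM dm2 h
                              have : dm2 = dm := le_antisymm h2 h1
                              subst this
                              simp
        · rw [descOf_cons_nonneg hx2]

-- ===== VERDICT (by name: the statement is the Claim_ definition above) =====
theorem check_peak_spec : Claim_equal_check_peak := by
  intro prefer _
  unfold Spec_check_peak check_peak
  rw [check_peak_alt_eq, check_peak_eq_goD, goD_false_eq (diffsOf prefer) 0]
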